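-- pv_equiv track=rewrite | github.com/ChangDarren/medict | Models/trie.py | __getPathWord
-- ===== SOURCE A (Python) =====
-- def __getPathWord(newWord):
--     """
--         Utility function to get the path in the trie given a word.
--
--         Path word should all be in lower case and should only alphanumeric
--         characters.
--
--         The decision to sort the words in reverse lexicographical order before
--         generating the path is to allow for the alphabets to come before the
--         numbers which will help when narrowing down the possible words later.
--     """
--     unwantedWords = ['capsule', 'capsules', 'tablet', 'tablets', 'injection']
--
--     pathWord = newWord.lower()
--     pathWord = ''.join(ch for ch in pathWord if (ch.isalnum() or ch == ' ' or ch == '/' or ch == '%'))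
--     splittedWords = pathWord.split(' ')
--     splittedWords = [word for word in splittedWords if word not in unwantedWords]
--
--     wordList = []
--     numberList = []
--
--     for word in splittedWords:
--         if not word:
--             continue
--
--         # Separate the words from the rest
--         if word[0].isdigit() or word[0] == '/' or word[0] == '%':
--             numberList.append(word)
--         else:
--             wordList.append(word)
--
--     # Only sort the words as we want to preserve the numbering order
--     wordList.sort(key=str.lower)
--
--     newPathWord = ''.join(wordList) + ''.join(numberList)
--     return newPathWord
-- ===== SOURCE B (Python) =====
-- def __getPathWord(newWord):
--     unwantedWords = ['capsule', 'capsules', 'tablet', 'tablets', 'injection']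
--
--     cleaned = ''.join(ch for ch in newWord.lower()
--                       if ch.isalnum() or ch == ' ' or ch == '/' or ch == '%')
--     tokens = [t for t in cleaned.split(' ') if t and t not in unwantedWords]
--
--     # One composite-keyed stable sort: words sort by their lowercase form,
--     # number-tokens all share one larger key so the stable sort keeps their order
--     # and places them after every word.
--     tokens.sort(key=lambda t: (1, '') if (t[0].isdigit() or t[0] == '/' or t[0] == '%')
--                 else (0, t.lower()))
--     return ''.join(tokens)
-- ===== Notes on version B (the rewrite author's own statement) =====
-- stated objective: alternative
-- what changed: Replaces A's explicit two-list partition loop, word-only sort and two joins by filtering the non-empty tokens once and doing a single composite-keyed stable sort (words -> (0, tok.lower()), number-tokens -> (1, '') so stability preserves their encounter order), then one join.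
import Mathlib
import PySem

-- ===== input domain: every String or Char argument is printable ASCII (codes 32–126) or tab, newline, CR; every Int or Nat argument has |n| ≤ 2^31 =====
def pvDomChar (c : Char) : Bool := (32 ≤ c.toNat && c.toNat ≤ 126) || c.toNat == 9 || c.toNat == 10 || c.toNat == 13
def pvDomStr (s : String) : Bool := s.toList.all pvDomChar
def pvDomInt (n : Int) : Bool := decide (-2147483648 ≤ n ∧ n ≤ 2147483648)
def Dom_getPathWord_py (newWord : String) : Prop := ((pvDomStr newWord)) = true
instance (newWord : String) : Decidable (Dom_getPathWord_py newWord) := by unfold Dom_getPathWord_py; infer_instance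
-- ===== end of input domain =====

-- B replaces A's two-list partition + word-only sort + two joins by one composite-keyed
-- stable sort over all tokens and a single join (objective: alternative decomposition).

-- ===== PORT A =====
def pvUnwanted : List (List Char) :=
  ["capsule".toList, "capsules".toList, "tablet".toList, "tablets".toList, "injection".toList]

def pvKeepChar (ch : Char) : Bool :=
  PySem.Chars.isalnum ch || ch == ' ' || ch == '/' || ch == '%'

def getPathWord_py (newWord : String) : String :=
  let pathWord := PySem.Chars.lower newWord.toList
  let pathWord := pathWord.filter pvKeepChar
  let splittedWords := PySem.Chars.splitOn pathWord [' ']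
  let splittedWords := splittedWords.filter (fun word => !(pvUnwanted.contains word))
  let p := splittedWords.foldl
    (fun (p : List (List Char) × List (List Char)) word =>
      match word with
      | [] => p                                   -- 'if not word: continue'
      | c :: _ =>
        if PySem.Chars.isdigit c || c == '/' || c == '%' then (p.1, p.2 ++ [word])
        else (p.1 ++ [word], p.2))
    ([], [])
  let wordList := PySem.List.sorted p.1 (fun w => PySem.Chars.lower w) false
  String.ofList (PySem.Chars.join [] wordList ++ PySem.Chars.join [] p.2)

-- ===== PORT B =====
def pvIsNumTok (t : List Char) : Bool :=
  match t with
  | c :: _ => PySem.Chars.isdigit c || c == '/' || c == '%'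
  | [] => false     -- never reached: all sorted tokens are non-empty

def getPathWord_py_alt (newWord : String) : String :=
  let cleaned := (PySem.Chars.lower newWord.toList).filter pvKeepChar
  let tokens := (PySem.Chars.splitOn cleaned [' ']).filter
      (fun t => !t.isEmpty && !(pvUnwanted.contains t))
  let tokens := PySem.List.sorted2 tokens
      (fun t => if pvIsNumTok t then (1 : Int) else 0)
      (fun t => if pvIsNumTok t then [] else PySem.Chars.lower t) false
  String.ofList (PySem.Chars.join [] tokens)

-- ===== PRECONDITION & SPEC =====
def Spec_getPathWord_py (newWord : String) (out : String) : Prop := out = getPathWord_py_alt newWord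
instance (newWord : String) (out : String) : Decidable (Spec_getPathWord_py newWord out) := by unfold Spec_getPathWord_py; infer_instance

-- ===== CLAIM (what is proved, stated in full; the proofs are below) =====
def Claim_equal_getPathWord_py : Prop := ∀ (newWord : String), Dom_getPathWord_py newWord → Spec_getPathWord_py newWord (getPathWord_py newWord)

-- ===== LEMMAS AND PROOFS =====

-- B's composite comparison, spelled out (sorted2's strict 'lt').
def pvB2 (a b : List Char) : Bool :=
  decide ((if pvIsNumTok a then (1 : Int) else 0) < (if pvIsNumTok b then (1 : Int) else 0)) ||
  !decide ((if pvIsNumTok b then (1 : Int) else 0) < (if pvIsNumTok a then (1 : Int) else 0)) &&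
  decide ((if pvIsNumTok a then [] else PySem.Chars.lower a) < (if pvIsNumTok b then [] else PySem.Chars.lower b))

-- A's comparison on words.
def pvB1 (a b : List Char) : Bool := decide (PySem.Chars.lower a < PySem.Chars.lower b)

theorem pvB2_num_false (t y : List Char) (ht : pvIsNumTok t = true) : pvB2 t y = false := by
  unfold pvB2; cases hy : pvIsNumTok y <;> simp_all

theorem pvB2_word_num (t n : List Char) (ht : pvIsNumTok t = false) (hn : pvIsNumTok n = true) :
    pvB2 t n = true := by unfold pvB2; simp [ht, hn]

theorem pvB2_word_word (t w : List Char) (ht : pvIsNumTok t = false) (hw : pvIsNumTok w = false) :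
    pvB2 t w = pvB1 t w := by unfold pvB2 pvB1; simp [ht, hw]

theorem pv_insertBy_congr (f g : List Char → List Char → Bool) (t : List Char) :
    ∀ ws : List (List Char), (∀ w ∈ ws, f t w = g t w) →
    PySem.List.insertBy f t ws = PySem.List.insertBy g t ws := by
  intro ws
  induction ws with
  | nil => intro _; rfl
  | cons w ws ih =>
    intro h
    simp only [PySem.List.insertBy, h w (by simp)]
    split
    · rfl
    · simp only [List.cons.injEq, true_and]
      exact ih (fun x hx => h x (by simp [hx]))

theorem pv_insertBy_append (before : List Char → List Char → Bool) (t : List Char)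
    (ns : List (List Char)) (hns : ∀ n ∈ ns, before t n = true) :
    ∀ ws : List (List Char),
    PySem.List.insertBy before t (ws ++ ns) = PySem.List.insertBy before t ws ++ ns := by
  intro ws
  induction ws with
  | nil =>
    cases ns with
    | nil => rfl
    | cons n ns' => simp [PySem.List.insertBy, hns n (by simp)]
  | cons w ws ih =>
    simp only [List.cons_append, PySem.List.insertBy]
    split <;> simp [ih]

theorem pv_mem_foldl_insertBy (f : List Char → List Char → Bool) :
    ∀ (l acc : List (List Char)) (y : List Char),
    y ∈ l.foldl (fun acc x => PySem.List.insertBy f x acc) acc → y ∈ acc ∨ y ∈ l := by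
  intro l
  induction l with
  | nil => intro acc y h; exact Or.inl h
  | cons x l ih =>
    intro acc y h
    rcases ih _ y h with h' | h'
    · rcases (PySem.List.mem_insertBy f x y acc).mp h' with h'' | h''
      · exact Or.inr (by simp [h''])
      · exact Or.inl h''
    · exact Or.inr (by simp [h'])

def pvWordP (w : List Char) : Bool := !w.isEmpty && !pvIsNumTok w
def pvNumP (w : List Char) : Bool := !w.isEmpty && pvIsNumTok w

-- A's partition loop, characterised by filters.
theorem pv_partition (l : List (List Char)) :
    ∀ ws ns : List (List Char),
    l.foldl (fun (p : List (List Char) × List (List Char)) word =>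
      match word with
      | [] => p
      | c :: _ =>
        if PySem.Chars.isdigit c || c == '/' || c == '%' then (p.1, p.2 ++ [word])
        else (p.1 ++ [word], p.2)) (ws, ns)
    = (ws ++ l.filter pvWordP, ns ++ l.filter pvNumP) := by
  induction l with
  | nil => intro ws ns; simp
  | cons w l ih =>
    intro ws ns
    cases w with
    | nil => simpa [pvWordP, pvNumP] using ih ws ns
    | cons c cs =>
      rw [List.foldl_cons]
      cases hB : (PySem.Chars.isdigit c || c == '/' || c == '%') with
      | true =>
        rw [show (match (c :: cs : List Char) with
              | [] => ((ws, ns) : List (List Char) × List (List Char))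
              | c :: _ =>
                if PySem.Chars.isdigit c || c == '/' || c == '%' then (ws, ns ++ [c :: cs])
                else (ws ++ [c :: cs], ns)) = (ws, ns ++ [c :: cs]) from by simp [hB]]
        rw [ih]
        simp [pvWordP, pvNumP, pvIsNumTok, hB]
      | false =>
        rw [show (match (c :: cs : List Char) with
              | [] => ((ws, ns) : List (List Char) × List (List Char))
              | c :: _ =>
                if PySem.Chars.isdigit c || c == '/' || c == '%' then (ws, ns ++ [c :: cs])
                else (ws ++ [c :: cs], ns)) = (ws ++ [c :: cs], ns) from by simp [hB]]
        rw [ih]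
        simp [pvWordP, pvNumP, pvIsNumTok, hB]

-- B's single stable sort = (A's stable word sort) ++ (numbers in encounter order).
theorem pv_sort_split (l : List (List Char)) :
    l.foldl (fun acc x => PySem.List.insertBy pvB2 x acc) []
    = (l.filter (fun w => !pvIsNumTok w)).foldl (fun acc x => PySem.List.insertBy pvB1 x acc) []
      ++ l.filter pvIsNumTok := by
  induction l using List.reverseRecOn with
  | nil => rfl
  | append_singleton l t ih =>
    rw [List.foldl_append, List.foldl_cons, List.foldl_nil, ih]
    by_cases ht : pvIsNumTok t = true
    · rw [PySem.List.insertBy_of_forall_not_before _ _ _ (fun y _ => pvB2_num_false t y ht)]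
      simp [ht, List.filter_append]
    · simp only [Bool.not_eq_true] at ht
      rw [pv_insertBy_append pvB2 t _ (fun n hn => pvB2_word_num t n ht (by
            simpa using (List.mem_filter.mp hn).2))]
      rw [pv_insertBy_congr pvB2 pvB1 t _ (fun w hw => by
            have hw' : w ∈ l.filter (fun w => !pvIsNumTok w) := by
              rcases pv_mem_foldl_insertBy pvB1 _ [] w hw with h | h
              · cases h
              · exact h
            have hwn : pvIsNumTok w = false := by
              simpa using (List.mem_filter.mp hw').2
            exact pvB2_word_word t w ht hwn)]
      simp [ht, List.filter_append, List.foldl_append]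

theorem pv_join_nil_cons (x : List Char) (xs : List (List Char)) :
    PySem.Chars.join [] (x :: xs) = x ++ PySem.Chars.join [] xs := by
  cases xs <;> simp [PySem.Chars.join, List.intercalate]

theorem pv_join_append (xs ys : List (List Char)) :
    PySem.Chars.join [] (xs ++ ys) = PySem.Chars.join [] xs ++ PySem.Chars.join [] ys := by
  induction xs with
  | nil => simp [PySem.Chars.join, List.intercalate]
  | cons x xs ih => simp [pv_join_nil_cons, ih]

theorem pv_sorted_eq (l : List (List Char)) :
    PySem.List.sorted l (fun w => PySem.Chars.lower w) false
    = List.foldl (fun acc x => PySem.List.insertBy pvB1 x acc) [] l := rfl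

theorem pv_sorted2_eq (l : List (List Char)) :
    PySem.List.sorted2 l (fun t => if pvIsNumTok t then (1 : Int) else 0)
      (fun t => if pvIsNumTok t then ([] : List Char) else PySem.Chars.lower t) false
    = List.foldl (fun acc x => PySem.List.insertBy pvB2 x acc) [] l := rfl

theorem pv_filter_word (s : List (List Char)) :
    (s.filter (fun t => !t.isEmpty && !pvUnwanted.contains t)).filter (fun w => !pvIsNumTok w)
    = (s.filter (fun word => !pvUnwanted.contains word)).filter pvWordP := by
  simp only [List.filter_filter]
  exact List.filter_congr (fun a _ => by
    cases hE : a.isEmpty <;> cases hN : pvIsNumTok a <;> cases hC : pvUnwanted.contains a <;>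
      simp_all [pvWordP, List.isEmpty_iff])

theorem pv_filter_num (s : List (List Char)) :
    (s.filter (fun t => !t.isEmpty && !pvUnwanted.contains t)).filter pvIsNumTok
    = (s.filter (fun word => !pvUnwanted.contains word)).filter pvNumP := by
  simp only [List.filter_filter]
  exact List.filter_congr (fun a _ => by
    cases hE : a.isEmpty <;> cases hN : pvIsNumTok a <;> cases hC : pvUnwanted.contains a <;>
      simp_all [pvNumP, List.isEmpty_iff])

-- ===== VERDICT (by name: the statement is the Claim_ definition above) =====
theorem getPathWord_py_spec : Claim_equal_getPathWord_py := by
  intro newWord _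
  unfold Spec_getPathWord_py getPathWord_py getPathWord_py_alt
  simp only
  rw [pv_partition]
  simp only [List.nil_append]
  rw [pv_sorted_eq, pv_sorted2_eq, pv_sort_split, pv_join_append,
      pv_filter_word, pv_filter_num]
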